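-- pv_equiv track=rewrite | github.com/Arsen1302/Code-copy-detector | TestData/solutions/problem_1027_3.py | solution_1027_3
-- ===== SOURCE A (Python) =====
-- def solution_1027_3(s: str) -> int:
--     n = len(s)
--     suffixes = [0] * n
--     unique = set()
--     for i in reversed(range(n)):
--         unique.add(s[i])
--         suffixes[i] = len(unique)
--
--     counter = 0
--     unique = set()
--     for i in range(n - 1):
--         unique.add(s[i])
--         if len(unique) == suffixes[i+1]:
--             counter += 1
--
--     return counter
-- ===== SOURCE B (Python) =====
-- def solution_1027_3(s: str) -> int:
--     # one pass: full-string character counts shrink into the suffix, a set grows into the prefix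
--     remaining = {}
--     for c in s:
--         remaining[c] = remaining.get(c, 0) + 1
--     prefix = set()
--     result = 0
--     for c in s[:len(s) - 1]:
--         prefix.add(c)
--         remaining[c] = remaining.get(c, 0) - 1
--         if remaining[c] == 0:
--             del remaining[c]
--         if len(prefix) == len(remaining):
--             result += 1
--     return result
-- ===== Notes on version B (the rewrite author's own statement) =====
-- stated objective: simpler
-- what changed: A precomputes a backward suffix-distinct-count table and then scans forward against it; B makes one forward pass that decrements a full-string character counter (deleting exhausted keys) while growing a prefix set, comparing the two sizes at each split, so the backward table-building pass disappears.
import Mathlib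
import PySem

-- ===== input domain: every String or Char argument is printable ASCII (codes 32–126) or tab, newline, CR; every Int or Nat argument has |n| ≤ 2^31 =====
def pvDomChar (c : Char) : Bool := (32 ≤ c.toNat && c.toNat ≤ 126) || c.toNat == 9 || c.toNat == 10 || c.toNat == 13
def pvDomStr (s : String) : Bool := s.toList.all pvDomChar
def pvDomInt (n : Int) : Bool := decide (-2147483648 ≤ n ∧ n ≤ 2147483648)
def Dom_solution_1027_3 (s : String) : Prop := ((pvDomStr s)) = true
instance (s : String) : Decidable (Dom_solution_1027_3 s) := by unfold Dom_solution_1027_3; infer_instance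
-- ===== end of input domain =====

-- B replaces A's precomputed backward suffix-distinct table by one forward pass that
-- shrinks a full-string character counter into the suffix while growing the prefix set
-- (objective: simpler — one pass, no table).

-- ===== PORT A =====
-- loop body of A's first (backward, table-filling) loop
def stepA1 (cs : List Char) (st : List Int × PySem.Set Char) (i : Int) : List Int × PySem.Set Char :=
  let u := PySem.Set.add st.2 (PySem.List.pyGetD cs i ' ')
  (st.1.set i.toNat ((u.length : Int)), u)

-- loop body of A's second (forward, counting) loop
def stepA2 (cs : List Char) (suffixes : List Int) (st : Int × PySem.Set Char) (i : Int) : Int × PySem.Set Char :=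
  let u := PySem.Set.add st.2 (PySem.List.pyGetD cs i ' ')
  (if (u.length : Int) = PySem.List.pyGetD suffixes (i + 1) 0 then st.1 + 1 else st.1, u)

def solution_1027_3 (s : String) : Int :=
  let cs := s.toList
  let n : Int := (cs.length : Int)
  let st1 := ((PySem.List.pyRange 0 n).reverse).foldl (stepA1 cs)
    (List.replicate cs.length 0, PySem.Set.empty)
  let st2 := (PySem.List.pyRange 0 (n - 1)).foldl (stepA2 cs st1.1) ((0 : Int), PySem.Set.empty)
  st2.1

-- ===== PORT B =====
-- loop body of B's single forward pass: state = (remaining counts, prefix set, result)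
def stepB (st : PySem.Dict Char Int × PySem.Set Char × Int) (c : Char) :
    PySem.Dict Char Int × PySem.Set Char × Int :=
  let pre := PySem.Set.add st.2.1 c
  let rem1 := st.1.insert c (st.1.getD c 0 - 1)
  let rem := if rem1.getD c 0 = 0 then rem1.erase c else rem1
  (rem, pre, if (pre.length : Int) = (rem.size : Int) then st.2.2 + 1 else st.2.2)

def solution_1027_3_alt (s : String) : Int :=
  let cs := s.toList
  let remaining := cs.foldl (fun (d : PySem.Dict Char Int) c => d.insert c (d.getD c 0 + 1))
    PySem.Dict.empty
  let st := (cs.take (cs.length - 1)).foldl stepB (remaining, PySem.Set.empty, (0 : Int))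
  st.2.2

-- ===== PRECONDITION & SPEC =====
def Spec_solution_1027_3 (s : String) (out : Int) : Prop := out = solution_1027_3_alt s
instance (s : String) (out : Int) : Decidable (Spec_solution_1027_3 s out) := by unfold Spec_solution_1027_3; infer_instance

-- ===== CLAIM (what is proved, stated in full; the proofs are below) =====
def Claim_equal_solution_1027_3 : Prop := ∀ (s : String), Dom_solution_1027_3 s → Spec_solution_1027_3 s (solution_1027_3 s)

-- ===== LEMMAS AND PROOFS =====

-- number of distinct characters of a list
def dcP (l : List Char) : Nat := (PySem.Set.ofList l).length

-- the common value of both programs: how many split points k+1 (k < m) balance the distinct counts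
def cntP (cs : List Char) (m : Nat) : Int :=
  ((List.range m).countP (fun k => decide (dcP (cs.take (k + 1)) = dcP (cs.drop (k + 1)))) : Nat)

lemma len_eq_dcP {u : PySem.Set Char} {l : List Char} (hnd : u.Nodup)
    (h : ∀ c, c ∈ u ↔ c ∈ l) : u.length = dcP l := by
  have hperm : u.Perm (PySem.Set.ofList l) :=
    (List.perm_ext_iff_of_nodup hnd (PySem.Set.nodup_ofList l)).2
      (fun a => (h a).trans (PySem.Set.mem_ofList l a).symm)
  simpa [dcP] using hperm.length_eq

lemma ofList_append_singleton (l : List Char) (x : Char) :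
    PySem.Set.ofList (l ++ [x]) = (PySem.Set.ofList l).add x := by
  simp [PySem.Set.ofList_eq_foldl, List.foldl_append]

lemma take_succ_of_lt (cs : List Char) (m : Nat) (h : m < cs.length) :
    cs.take (m + 1) = cs.take m ++ [cs[m]] := by
  rw [List.take_add_one, List.getElem?_eq_getElem h]
  rfl

lemma cntP_succ (cs : List Char) (m : Nat) :
    cntP cs (m + 1)
      = cntP cs m + (if dcP (cs.take (m + 1)) = dcP (cs.drop (m + 1)) then (1 : Int) else 0) := by
  simp only [cntP, List.range_succ, List.countP_append, List.countP_cons, List.countP_nil]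
  by_cases h : dcP (cs.take (m + 1)) = dcP (cs.drop (m + 1))
  · rw [if_pos h, decide_eq_true h]
    simp
  · rw [if_neg h, decide_eq_false h]
    simp

-- both programs gate the same +1 on an Int-cast comparison of the two distinct counts
lemma cond_count (a b : Nat) (r : Int) :
    (if (a : Int) = (b : Int) then r + 1 else r) = r + (if a = b then (1 : Int) else 0) := by
  by_cases h : a = b <;> simp [h]

-- A's first loop fills the table with the suffix distinct counts
lemma tblA (cs : List Char) : ∀ (j : Nat) (tbl : List Int) (u : PySem.Set Char),
    j ≤ cs.length → tbl.length = cs.length → u.Nodup → (∀ c, c ∈ u ↔ c ∈ cs.drop j) →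
    ((PySem.List.pyRange 0 (j : Int)).reverse.foldl (stepA1 cs) (tbl, u)).1.length = cs.length ∧
    ∀ k : Nat, k < cs.length →
      ((PySem.List.pyRange 0 (j : Int)).reverse.foldl (stepA1 cs) (tbl, u)).1.getD k 0
        = if k < j then (dcP (cs.drop k) : Int) else tbl.getD k 0 := by
  intro j
  induction j with
  | zero =>
    intro tbl u _ hlen _ _
    have h0 : (PySem.List.pyRange 0 ((0 : Nat) : Int)).reverse = ([] : List Int) := rfl
    rw [h0]
    exact ⟨hlen, fun k _ => by simp⟩
  | succ j ih =>
    intro tbl u hj hlen hnd hmem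
    have hjlt : j < cs.length := by omega
    have hrange : PySem.List.pyRange 0 ((j + 1 : Nat) : Int)
        = PySem.List.pyRange 0 (j : Int) ++ [(j : Int)] := by
      push_cast
      exact PySem.List.pyRange_one_succ_right (by positivity)
    have hget : PySem.List.pyGetD cs (j : Int) ' ' = cs[j] := by
      rw [PySem.List.pyGetD_natCast, List.getD_eq_getElem cs ' ' hjlt]
    have hstep : stepA1 cs (tbl, u) (j : Int)
        = (tbl.set j (((u.add cs[j]).length : Int)), u.add cs[j]) := by
      simp [stepA1, hget]
    have hdrop : cs.drop j = cs[j] :: cs.drop (j + 1) := List.drop_eq_getElem_cons hjlt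
    have hmem' : ∀ c, c ∈ u.add cs[j] ↔ c ∈ cs.drop j := by
      intro c
      rw [PySem.Set.mem_add, hmem c, hdrop, List.mem_cons]
      tauto
    have hnd' : (u.add cs[j]).Nodup := PySem.Set.nodup_add u _ hnd
    have hulen : (u.add cs[j]).length = dcP (cs.drop j) := len_eq_dcP hnd' hmem'
    have hkey : (PySem.List.pyRange 0 ((j + 1 : Nat) : Int)).reverse.foldl (stepA1 cs) (tbl, u)
        = (PySem.List.pyRange 0 (j : Int)).reverse.foldl (stepA1 cs)
            (tbl.set j (((u.add cs[j]).length : Int)), u.add cs[j]) := by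
      rw [hrange, List.reverse_append]
      simp only [List.reverse_cons, List.reverse_nil, List.nil_append, List.cons_append,
        List.foldl_cons]
      rw [hstep]
    obtain ⟨ih1, ih2⟩ := ih (tbl.set j (((u.add cs[j]).length : Int))) (u.add cs[j])
      (by omega) (by simpa using hlen) hnd' (fun c => hmem' c)
    rw [hkey]
    refine ⟨ih1, ?_⟩
    intro k hk
    rw [ih2 k hk]
    rcases lt_trichotomy k j with hkj | hkj | hkj
    · simp [hkj, Nat.lt_succ_of_lt hkj]
    · subst hkj
      have hklen : k < (tbl.set k (((u.add cs[k]).length : Int))).length := by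
        simpa [hlen] using hk
      rw [if_neg (lt_irrefl k), if_pos (Nat.lt_succ_self k),
        List.getD_eq_getElem _ _ hklen, List.getElem_set_self, hulen]
    · have h1 : ¬ k < j := by omega
      have h2 : ¬ k < j + 1 := by omega
      rw [if_neg h1, if_neg h2]
      have hklen : k < (tbl.set j (((u.add cs[j]).length : Int))).length := by
        simpa [hlen] using hk
      rw [List.getD_eq_getElem _ _ hklen, List.getElem_set_ne (by omega),
        List.getD_eq_getElem tbl 0 (by omega : k < tbl.length)]

-- A's second loop counts the balanced split points against the table
lemma loopA (cs : List Char) (suffixes : List Int)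
    (hs : ∀ k : Nat, k < cs.length → suffixes.getD k 0 = (dcP (cs.drop k) : Int)) :
    ∀ m : Nat, m + 1 ≤ cs.length →
    (PySem.List.pyRange 0 (m : Int)).foldl (stepA2 cs suffixes) ((0 : Int), PySem.Set.empty)
      = (cntP cs m, PySem.Set.ofList (cs.take m)) := by
  intro m
  induction m with
  | zero =>
    intro _
    have h0 : PySem.List.pyRange 0 ((0 : Nat) : Int) = ([] : List Int) := rfl
    rw [h0]
    rfl
  | succ m ih =>
    intro hm
    have hmlt : m < cs.length := by omega
    have hm1lt : m + 1 < cs.length := by omega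
    have hrange : PySem.List.pyRange 0 ((m + 1 : Nat) : Int)
        = PySem.List.pyRange 0 (m : Int) ++ [(m : Int)] := by
      push_cast
      exact PySem.List.pyRange_one_succ_right (by positivity)
    have hget : PySem.List.pyGetD cs (m : Int) ' ' = cs[m] := by
      rw [PySem.List.pyGetD_natCast, List.getD_eq_getElem cs ' ' hmlt]
    have hpre : (PySem.Set.ofList (cs.take m)).add cs[m] = PySem.Set.ofList (cs.take (m + 1)) := by
      rw [take_succ_of_lt cs m hmlt, ofList_append_singleton]
    have hsuf : PySem.List.pyGetD suffixes ((m : Int) + 1) 0 = (dcP (cs.drop (m + 1)) : Int) := by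
      rw [show ((m : Int) + 1) = ((m + 1 : Nat) : Int) by push_cast; ring,
        PySem.List.pyGetD_natCast]
      exact hs (m + 1) hm1lt
    rw [hrange, List.foldl_append, ih (by omega), List.foldl_cons, List.foldl_nil]
    simp only [stepA2, hget, hpre, hsuf]
    rw [show List.length (PySem.Set.ofList (cs.take (m + 1))) = dcP (cs.take (m + 1)) from rfl,
      cond_count, ← cntP_succ]

-- find? commutes with erasing one key (B's delete-on-zero step)
lemma find?_filter_ne (items : List (Char × Int)) (k x : Char) :
    (items.filter (fun p => !(p.1 == k))).find? (fun p => p.1 == x)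
      = if x = k then none else items.find? (fun p => p.1 == x) := by
  induction items with
  | nil => simp
  | cons p t ih =>
    rw [List.filter_cons]
    by_cases hpk : p.1 = k
    · rw [if_neg (by simp [hpk]), ih]
      by_cases hxk : x = k
      · simp [hxk]
      · have hpx : (p.1 == x) = false := by
          simp only [beq_eq_false_iff_ne, ne_eq, hpk]
          exact fun h => hxk h.symm
        simp [hpx, hxk]
    · rw [if_pos (by simp [hpk])]
      by_cases hpx : p.1 = x
      · have hxk : ¬ x = k := fun h => hpk (hpx.trans h)
        simp [hpx, hxk]
      · have hpx' : (p.1 == x) = false := by simpa using hpx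
        simp only [List.find?_cons, hpx']
        exact ih

lemma dict_get?_erase (d : PySem.Dict Char Int) (k x : Char) :
    (d.erase k).get? x = if x = k then none else d.get? x := by
  cases d with | mk items =>
  show ((items.filter (fun p => !(p.1 == k))).find? (fun p => p.1 == x)).map Prod.snd
      = if x = k then none else ((items.find? (fun p => p.1 == x)).map Prod.snd)
  rw [find?_filter_ne]
  split_ifs <;> rfl

lemma dict_getD_erase (d : PySem.Dict Char Int) (k x : Char) :
    (d.erase k).getD x 0 = if x = k then 0 else d.getD x 0 := by
  show ((d.erase k).get? x).getD 0 = _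
  rw [dict_get?_erase]
  split_ifs <;> rfl

lemma dict_keys_erase (d : PySem.Dict Char Int) (k : Char) :
    (d.erase k).keys = d.keys.filter (fun x => !(x == k)) := by
  cases d with | mk items =>
  show (items.filter (fun p => !(p.1 == k))).map Prod.fst
      = (items.map Prod.fst).filter (fun x => !(x == k))
  exact (List.filter_map (f := Prod.fst) (p := fun x => !(x == k)) (l := items)).symm

lemma dict_size_eq_keys_length (d : PySem.Dict Char Int) : d.size = d.keys.length := by
  cases d with | mk items =>
  show items.length = (items.map Prod.fst).length
  rw [List.length_map]

-- B's single pass: the counter always holds the multiplicities of the current suffix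
lemma loopB (cs : List Char) : ∀ (m : Nat), m + 1 ≤ cs.length →
    ∃ rem : PySem.Dict Char Int,
      (cs.take m).foldl stepB (PySem.Dict.counter cs, PySem.Set.empty, (0 : Int))
        = (rem, PySem.Set.ofList (cs.take m), cntP cs m)
      ∧ rem.keys.Nodup
      ∧ (∀ c, rem.getD c 0 = ((cs.drop m).count c : Int))
      ∧ (∀ c, c ∈ rem.keys ↔ c ∈ cs.drop m) := by
  intro m
  induction m with
  | zero =>
    intro _
    refine ⟨PySem.Dict.counter cs, rfl, PySem.Dict.nodup_keys_counter cs, ?_, ?_⟩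
    · intro c; simp [PySem.Dict.getD_counter cs c]
    · intro c; rw [PySem.Dict.keys_counter]; simp [PySem.Set.mem_ofList cs c]
  | succ m ih =>
    intro hm
    have hmlt : m < cs.length := by omega
    obtain ⟨rem, heq, hnd, hgetD, hmem⟩ := ih (by omega)
    have hdrop : cs.drop m = cs[m] :: cs.drop (m + 1) := List.drop_eq_getElem_cons hmlt
    have hcmem : cs[m] ∈ cs.drop m := by rw [hdrop]; exact List.mem_cons_self
    have hpre : (PySem.Set.ofList (cs.take m)).add cs[m] = PySem.Set.ofList (cs.take (m + 1)) := by
      rw [take_succ_of_lt cs m hmlt, ofList_append_singleton]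
    have hcount : rem.getD cs[m] 0 = ((cs.drop (m + 1)).count cs[m] : Int) + 1 := by
      rw [hgetD, hdrop, List.count_cons_self]
      push_cast
      ring
    have hrem1getD : ∀ x, (rem.insert cs[m] (rem.getD cs[m] 0 - 1)).getD x 0
        = if x = cs[m] then ((cs.drop (m + 1)).count cs[m] : Int) else rem.getD x 0 := by
      intro x
      rw [PySem.Dict.getD_insert]
      split_ifs with hx
      · rw [hcount]; ring
      · rfl
    have hrem1keys : (rem.insert cs[m] (rem.getD cs[m] 0 - 1)).keys = rem.keys :=
      PySem.Dict.keys_insert_of_contains rem _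
        ((PySem.Dict.contains_iff_mem_keys rem cs[m]).2 ((hmem _).2 hcmem))
    have hfold : (cs.take (m + 1)).foldl stepB (PySem.Dict.counter cs, PySem.Set.empty, (0 : Int))
        = stepB (rem, PySem.Set.ofList (cs.take m), cntP cs m) cs[m] := by
      rw [take_succ_of_lt cs m hmlt, List.foldl_append, heq, List.foldl_cons, List.foldl_nil]
    have hb : ∀ x : Char, ((!(x == cs[m])) = true) ↔ x ≠ cs[m] := by intro x; simp
    by_cases hz : (cs.drop (m + 1)).count cs[m] = 0
    · -- the counter key is exhausted: B deletes it
      have hnotin : cs[m] ∉ cs.drop (m + 1) := List.count_eq_zero.mp hz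
      have hcond : (rem.insert cs[m] (rem.getD cs[m] 0 - 1)).getD cs[m] 0 = 0 := by
        rw [hrem1getD, if_pos rfl, hz]; rfl
      have hkeysP : ∀ x, x ∈ ((rem.insert cs[m] (rem.getD cs[m] 0 - 1)).erase cs[m]).keys
          ↔ x ∈ cs.drop (m + 1) := by
        intro x
        rw [dict_keys_erase, List.mem_filter, hrem1keys, hb x]
        constructor
        · rintro ⟨hx, hne⟩
          have hx' := (hmem x).1 hx
          rw [hdrop, List.mem_cons] at hx'
          tauto
        · intro hx
          exact ⟨(hmem x).2 (by rw [hdrop]; exact List.mem_cons_of_mem _ hx),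
            fun hxe => hnotin (hxe ▸ hx)⟩
      have hndE : ((rem.insert cs[m] (rem.getD cs[m] 0 - 1)).erase cs[m]).keys.Nodup := by
        rw [dict_keys_erase, hrem1keys]; exact hnd.filter _
      have hsz : ((rem.insert cs[m] (rem.getD cs[m] 0 - 1)).erase cs[m]).size
          = dcP (cs.drop (m + 1)) := by
        rw [dict_size_eq_keys_length]
        exact len_eq_dcP hndE hkeysP
      refine ⟨(rem.insert cs[m] (rem.getD cs[m] 0 - 1)).erase cs[m], ?_, hndE, ?_, hkeysP⟩
      · rw [hfold]
        simp only [stepB]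
        rw [if_pos hcond, hpre, hsz,
          show List.length (PySem.Set.ofList (cs.take (m + 1))) = dcP (cs.take (m + 1)) from rfl,
          cond_count, ← cntP_succ]
      · intro x
        rw [dict_getD_erase]
        split_ifs with hx
        · rw [hx, hz]; rfl
        · have hcc : List.count x (cs.drop m) = List.count x (cs.drop (m + 1)) := by
            rw [hdrop, List.count_cons]
            simp [Ne.symm hx]
          rw [hrem1getD, if_neg hx, hgetD, hcc]
    · -- the character still occurs in the suffix: the key stays
      have hcond : ¬ (rem.insert cs[m] (rem.getD cs[m] 0 - 1)).getD cs[m] 0 = 0 := by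
        rw [hrem1getD, if_pos rfl]
        exact_mod_cast hz
      have hkeysP : ∀ x, x ∈ (rem.insert cs[m] (rem.getD cs[m] 0 - 1)).keys
          ↔ x ∈ cs.drop (m + 1) := by
        intro x
        rw [hrem1keys, hmem x, hdrop, List.mem_cons]
        constructor
        · rintro (h | h)
          · subst h; exact List.count_pos_iff.1 (Nat.pos_of_ne_zero hz)
          · exact h
        · exact fun h => Or.inr h
      have hndK : (rem.insert cs[m] (rem.getD cs[m] 0 - 1)).keys.Nodup := by
        rw [hrem1keys]; exact hnd
      have hsz : (rem.insert cs[m] (rem.getD cs[m] 0 - 1)).size = dcP (cs.drop (m + 1)) := by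
        rw [dict_size_eq_keys_length]
        exact len_eq_dcP hndK hkeysP
      refine ⟨rem.insert cs[m] (rem.getD cs[m] 0 - 1), ?_, hndK, ?_, hkeysP⟩
      · rw [hfold]
        simp only [stepB]
        rw [if_neg hcond, hpre, hsz,
          show List.length (PySem.Set.ofList (cs.take (m + 1))) = dcP (cs.take (m + 1)) from rfl,
          cond_count, ← cntP_succ]
      · intro x
        rw [hrem1getD]
        split_ifs with hx
        · rw [hx]
        · have hcc : List.count x (cs.drop m) = List.count x (cs.drop (m + 1)) := by
            rw [hdrop, List.count_cons]
            simp [Ne.symm hx]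
          rw [hgetD, hcc]

-- A computes the common count
lemma A_eq (s : String) (h : s.toList ≠ []) :
    solution_1027_3 s = cntP s.toList (s.toList.length - 1) := by
  have hlen : 1 ≤ s.toList.length := List.length_pos_iff.2 h
  simp only [solution_1027_3]
  obtain ⟨h1, h2⟩ := tblA s.toList s.toList.length (List.replicate s.toList.length 0)
    PySem.Set.empty (le_refl _) (by simp) List.nodup_nil (fun c => by rw [List.drop_length]; simp)
  have hs : ∀ k : Nat, k < s.toList.length →
      (((PySem.List.pyRange 0 ((s.toList.length : Nat) : Int)).reverse.foldl (stepA1 s.toList)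
        (List.replicate s.toList.length 0, PySem.Set.empty)).1).getD k 0
        = (dcP (s.toList.drop k) : Int) := by
    intro k hk
    rw [h2 k hk, if_pos hk]
  have hcast : ((s.toList.length : Int) - 1) = ((s.toList.length - 1 : Nat) : Int) := by
    rw [Nat.cast_sub hlen]; rfl
  rw [hcast, loopA s.toList _ hs (s.toList.length - 1) (by omega)]

-- B computes the common count
lemma B_eq (s : String) (h : s.toList ≠ []) :
    solution_1027_3_alt s = cntP s.toList (s.toList.length - 1) := by
  have hlen : 1 ≤ s.toList.length := List.length_pos_iff.2 h
  simp only [solution_1027_3_alt]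
  rw [PySem.Dict.foldl_insert_getD_add_one_eq_counter]
  obtain ⟨rem, heq, -, -, -⟩ := loopB s.toList (s.toList.length - 1) (by omega)
  rw [heq]

-- ===== VERDICT (by name: the statement is the Claim_ definition above) =====
theorem solution_1027_3_spec : Claim_equal_solution_1027_3 := by
  intro s _
  unfold Spec_solution_1027_3
  by_cases h : s.toList = []
  · simp only [solution_1027_3, solution_1027_3_alt, h]
    rfl
  · rw [A_eq s h, B_eq s h]
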